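-- pv_equiv track=rewrite | github.com/mohammadfaiizan/ProjectI | DSA/Dynamic_Programming/005_dp_grid_matrix.py | gold_mine_with_time_limit
-- ===== SOURCE A (Python) =====
-- from typing import List, Dict, Tuple, Optional
--
-- def gold_mine_with_time_limit(gold: List[List[int]], time_limit: int) -> int:
--     """
--     Collect maximum gold within time limit
--     Each move takes 1 unit of time
--
--     Args:
--         gold: 2D gold grid
--         time_limit: Maximum time allowed
--
--     Returns:
--         Maximum gold collected within time limit
--     """
--     if not gold or not gold[0] or time_limit <= 0:
--         return 0
--
--     m, n = len(gold), len(gold[0])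
--
--     # dp[i][j][t] = max gold at (i,j) with time t
--     dp = [[[0 for _ in range(time_limit + 1)]
--            for _ in range(n)] for _ in range(m)]
--
--     # Initialize: can start at any cell at time 0
--     for i in range(m):
--         for j in range(n):
--             if gold[i][j] > 0:
--                 dp[i][j][1] = gold[i][j]
--
--     directions = [(0, 1), (1, 0), (0, -1), (-1, 0)]
--
--     for t in range(2, time_limit + 1):
--         for i in range(m):
--             for j in range(n):
--                 if gold[i][j] == 0:
--                     continue
--
--                 for di, dj in directions:
--                     ni, nj = i + di, j + dj
--                     if (0 <= ni < m and 0 <= nj < n and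
--                         dp[ni][nj][t - 1] > 0):
--                         dp[i][j][t] = max(dp[i][j][t],
--                                         dp[ni][nj][t - 1] + gold[i][j])
--
--     max_gold = 0
--     for i in range(m):
--         for j in range(n):
--             for t in range(time_limit + 1):
--                 max_gold = max(max_gold, dp[i][j][t])
--
--     return max_gold
-- ===== SOURCE B (Python) =====
-- from typing import List
--
-- def gold_mine_with_time_limit(gold: List[List[int]], time_limit: int) -> int:
--     """Top-down memoized recursion f(i, j, t) = best gold of a walk of duration t
--     ending at (i, j), instead of filling an explicit 3-D bottom-up DP table."""
--     if not gold or not gold[0] or time_limit <= 0: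
--         return 0
--
--     m, n = len(gold), len(gold[0])
--     memo = {}
--
--     def f(i, j, t):
--         key = (i, j, t)
--         cached = memo.get(key)
--         if cached is not None:
--             return cached
--         g = gold[i][j]
--         if t == 1:
--             res = g if g > 0 else 0
--         elif g == 0:
--             res = 0
--         else:
--             res = 0
--             for ni, nj in ((i - 1, j), (i + 1, j), (i, j - 1), (i, j + 1)):
--                 if 0 <= ni < m and 0 <= nj < n:
--                     v = f(ni, nj, t - 1)
--                     if v > 0 and v + g > res:
--                         res = v + g
--         memo[key] = res
--         return res
--
--     best = 0
--     for t in range(1, time_limit + 1):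
--         for i in range(m):
--             for j in range(n):
--                 v = f(i, j, t)
--                 if v > best:
--                     best = v
--     return best
-- ===== Notes on version B (the rewrite author's own statement) =====
-- stated objective: alternative
-- what changed: Replaces the bottom-up 3-D DP table (explicit init sweep, time-layer sweeps with in-place cell updates, and a final triple max scan) by a top-down memoized recursive helper f(i,j,t) cached in a dict keyed on (i,j,t), with the answer folded as a running best while the states are demanded.
-- outside the precondition, e.g. on gold_mine_with_time_limit([[1, 2], [3]], 2): A raises IndexError, B raises IndexError
import Mathlib
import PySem

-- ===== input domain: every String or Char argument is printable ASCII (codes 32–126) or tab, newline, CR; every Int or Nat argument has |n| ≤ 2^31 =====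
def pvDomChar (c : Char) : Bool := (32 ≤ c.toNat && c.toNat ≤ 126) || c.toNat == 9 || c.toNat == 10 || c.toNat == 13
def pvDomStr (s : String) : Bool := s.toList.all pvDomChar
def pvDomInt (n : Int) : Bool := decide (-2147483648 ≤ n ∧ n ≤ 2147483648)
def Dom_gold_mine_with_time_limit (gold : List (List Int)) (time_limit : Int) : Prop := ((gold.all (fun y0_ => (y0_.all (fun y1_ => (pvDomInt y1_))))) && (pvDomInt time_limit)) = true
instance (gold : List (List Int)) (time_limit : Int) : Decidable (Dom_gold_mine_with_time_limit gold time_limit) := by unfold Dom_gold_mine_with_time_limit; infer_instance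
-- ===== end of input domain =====

-- B replaces A's bottom-up 3-D DP table by a top-down memoized recursion f(i,j,t)
-- cached in a dict keyed on (i,j,t), folding a running best as states are demanded.

-- ===== PORT A =====
-- gold[i][j] read (indices are in range under Pre_, so a default never fires)
def pvGold (gold : List (List Int)) (i j : Int) : Int :=
  PySem.List.pyGetD (PySem.List.pyGetD gold i []) j 0

-- dp[i][j] / dp[i][j][t] reads (in range by construction of dp, defaults never fire)
def pvCell (dp : List (List (List Int))) (i j : Int) : List Int :=
  PySem.List.pyGetD (PySem.List.pyGetD dp i []) j []

def pvGet3 (dp : List (List (List Int))) (i j t : Int) : Int :=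
  PySem.List.pyGetD (pvCell dp i j) t 0

-- dp[i][j][t] = v ; the indices here are always ≥ 0 (they come from range), so .toNat is exact
def pvSet3 (dp : List (List (List Int))) (i j t : Int) (v : Int) : List (List (List Int)) :=
  dp.set i.toNat ((PySem.List.pyGetD dp i []).set j.toNat ((pvCell dp i j).set t.toNat v))

def gold_mine_with_time_limit (gold : List (List Int)) (time_limit : Int) : Int :=
  if gold = [] ∨ gold.headD [] = [] ∨ time_limit ≤ 0 then 0
  else
    let m : Int := gold.length
    let n : Int := (gold.headD []).length
    let dp : List (List (List Int)) :=
      (PySem.List.pyRange 0 m 1).map (fun _ =>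
        (PySem.List.pyRange 0 n 1).map (fun _ =>
          (PySem.List.pyRange 0 (time_limit + 1) 1).map (fun _ => (0 : Int))))
    let dp := (PySem.List.pyRange 0 m 1).foldl (fun dp i =>
      (PySem.List.pyRange 0 n 1).foldl (fun dp j =>
        if pvGold gold i j > 0 then pvSet3 dp i j 1 (pvGold gold i j) else dp) dp) dp
    let directions : List (Int × Int) := [(0, 1), (1, 0), (0, -1), (-1, 0)]
    let dp := (PySem.List.pyRange 2 (time_limit + 1) 1).foldl (fun dp t =>
      (PySem.List.pyRange 0 m 1).foldl (fun dp i =>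
        (PySem.List.pyRange 0 n 1).foldl (fun dp j =>
          if pvGold gold i j = 0 then dp
          else
            directions.foldl (fun dp d =>
              let ni := i + d.1
              let nj := j + d.2
              if 0 ≤ ni ∧ ni < m ∧ 0 ≤ nj ∧ nj < n ∧ pvGet3 dp ni nj (t - 1) > 0 then
                pvSet3 dp i j t (max (pvGet3 dp i j t) (pvGet3 dp ni nj (t - 1) + pvGold gold i j))
              else dp) dp) dp) dp) dp
    (PySem.List.pyRange 0 m 1).foldl (fun mg i =>
      (PySem.List.pyRange 0 n 1).foldl (fun mg j =>
        (PySem.List.pyRange 0 (time_limit + 1) 1).foldl (fun mg t =>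
          max mg (pvGet3 dp i j t)) mg) mg) 0

-- ===== PORT B =====
-- B's gold[i][j] read
def bGold (gold : List (List Int)) (i j : Int) : Int :=
  PySem.List.pyGetD (PySem.List.pyGetD gold i []) j 0

-- the memoized recursive helper f(i, j, t); the Nat index t here stands for
-- Python's time argument t+1 (so recursion is structural); the memo dict is threaded
def altF (gold : List (List Int)) (m n : Int) (t : Nat) (i j : Int)
    (memo : PySem.Dict (Int × Int × Int) Int) :
    Int × PySem.Dict (Int × Int × Int) Int :=
  match memo.get? (i, j, (t : Int) + 1) with
  | some v => (v, memo)
  | none =>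
    let g := bGold gold i j
    match t with
    | 0 =>
      let res := if g > 0 then g else 0
      (res, memo.insert (i, j, 1) res)
    | k + 1 =>
      if g = 0 then (0, memo.insert (i, j, (k : Int) + 2) 0)
      else
        let st := ([(i - 1, j), (i + 1, j), (i, j - 1), (i, j + 1)] : List (Int × Int)).foldl
          (fun st p =>
            if 0 ≤ p.1 ∧ p.1 < m ∧ 0 ≤ p.2 ∧ p.2 < n then
              let r := altF gold m n k p.1 p.2 st.2
              ((if r.1 > 0 ∧ r.1 + g > st.1 then r.1 + g else st.1), r.2)
            else st) (0, memo)
        (st.1, st.2.insert (i, j, (k : Int) + 2) st.1)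
  termination_by t

def gold_mine_with_time_limit_alt (gold : List (List Int)) (time_limit : Int) : Int :=
  if gold = [] ∨ gold.headD [] = [] ∨ time_limit ≤ 0 then 0
  else
    let m : Int := gold.length
    let n : Int := (gold.headD []).length
    let st := (List.range time_limit.toNat).foldl (fun st (t : Nat) =>
      (List.range gold.length).foldl (fun st (i : Nat) =>
        (List.range (gold.headD []).length).foldl (fun st (j : Nat) =>
          let r := altF gold m n t (i : Int) (j : Int) st.2
          ((if r.1 > st.1 then r.1 else st.1), r.2)) st) st)
      ((0 : Int), (PySem.Dict.empty : PySem.Dict (Int × Int × Int) Int))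
    st.1

-- ===== PRECONDITION & SPEC =====
-- Pre_ excludes ragged grids (a row shorter than row 0) reached with time_limit ≥ 1,
-- on which A raises IndexError (B raises there too).
def Pre_gold_mine_with_time_limit (gold : List (List Int)) (time_limit : Int) : Prop :=
  time_limit ≤ 0 ∨ ∀ row ∈ gold, (gold.headD []).length ≤ row.length

instance (gold : List (List Int)) (time_limit : Int) :
    Decidable (Pre_gold_mine_with_time_limit gold time_limit) := by
  unfold Pre_gold_mine_with_time_limit; infer_instance

def pvWitness_gold_mine_with_time_limit : List (List Int) × Int := ([[1, 0], [2, 3]], 3)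

def Spec_gold_mine_with_time_limit (gold : List (List Int)) (time_limit : Int) (out : Int) : Prop := out = gold_mine_with_time_limit_alt gold time_limit
instance (gold : List (List Int)) (time_limit : Int) (out : Int) : Decidable (Spec_gold_mine_with_time_limit gold time_limit out) := by unfold Spec_gold_mine_with_time_limit; infer_instance

-- ===== CLAIM (what is proved, stated in full; the proofs are below) =====
def Claim_equal_gold_mine_with_time_limit : Prop := ∀ (gold : List (List Int)) (time_limit : Int), Dom_gold_mine_with_time_limit gold time_limit → Pre_gold_mine_with_time_limit gold time_limit → Spec_gold_mine_with_time_limit gold time_limit (gold_mine_with_time_limit gold time_limit)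

-- ===== LEMMAS AND PROOFS =====

-- ---------- generic fold helpers ----------
theorem pvFoldlRangeUpd {α : Type} (N : Nat) (body : α → Nat → α) (S : Nat → α)
    (h : ∀ k, k < N → body (S k) k = S (k + 1)) :
    (List.range N).foldl body (S 0) = S N := by
  induction N with
  | zero => simp
  | succ N ih =>
    rw [List.range_succ, List.foldl_append]
    rw [ih (fun k hk => h k (Nat.lt_succ_of_lt hk))]
    simpa using h N (Nat.lt_succ_self N)

theorem pvIfMax (a v : Int) : (if v > a then v else a) = max a v := by
  simp only [Int.max_def]
  split_ifs <;> omega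

-- ---------- abstract tables ----------
def pvUpd (F : Int → Int → Int → Int) (i j t v : Int) : Int → Int → Int → Int :=
  fun i' j' t' => if i' = i ∧ j' = j ∧ t' = t then v else F i' j' t'

def pvTab (m n P : Int) (F : Int → Int → Int → Int) : List (List (List Int)) :=
  (PySem.List.pyRange 0 m 1).map fun i =>
    (PySem.List.pyRange 0 n 1).map fun j =>
      (PySem.List.pyRange 0 P 1).map fun t => F i j t

theorem pvTabCongr (m n P : Int) (F G : Int → Int → Int → Int)
    (h : ∀ i j t, 0 ≤ i → i < m → 0 ≤ j → j < n → 0 ≤ t → t < P → F i j t = G i j t) :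
    pvTab m n P F = pvTab m n P G := by
  unfold pvTab
  refine List.map_congr_left (fun i hi => ?_)
  rw [PySem.List.mem_pyRange_one] at hi
  refine List.map_congr_left (fun j hj => ?_)
  rw [PySem.List.mem_pyRange_one] at hj
  refine List.map_congr_left (fun t ht => ?_)
  rw [PySem.List.mem_pyRange_one] at ht
  exact h i j t hi.1 hi.2 hj.1 hj.2 ht.1 ht.2

theorem pvGetTab (m n P : Int) (F : Int → Int → Int → Int) (i j t : Int)
    (hi0 : 0 ≤ i) (hi : i < m) (hj0 : 0 ≤ j) (hj : j < n) (ht0 : 0 ≤ t) (ht : t < P) :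
    pvGet3 (pvTab m n P F) i j t = F i j t := by
  unfold pvGet3 pvCell pvTab
  rw [PySem.List.pyGetD_map_pyRange_of_nonneg _ _ _ _ hi0 hi,
      PySem.List.pyGetD_map_pyRange_of_nonneg _ _ _ _ hj0 hj,
      PySem.List.pyGetD_map_pyRange_of_nonneg _ _ _ _ ht0 ht]

theorem pvSetMapPyRange {α : Type} (f : Int → α) (m i : Int) (v : α)
    (h0 : 0 ≤ i) (h : i < m) :
    ((PySem.List.pyRange 0 m 1).map f).set i.toNat v
      = (PySem.List.pyRange 0 m 1).map (fun k => if k = i then v else f k) := by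
  apply List.ext_getElem
  · simp
  · intro k h1 h2
    simp only [List.getElem_set, List.getElem_map] at *
    have hk : k < (m - 0).toNat := by
      simpa [PySem.List.length_pyRange_one] using (by simpa using h2)
    rw [PySem.List.getElem_pyRange_one]
    by_cases hki : i.toNat = k
    · rw [if_pos hki, if_pos (by omega)]
    · rw [if_neg hki, if_neg (by omega)]

theorem pvSetTab (m n P : Int) (F : Int → Int → Int → Int) (i j t v : Int)
    (hi0 : 0 ≤ i) (hi : i < m) (hj0 : 0 ≤ j) (hj : j < n) (ht0 : 0 ≤ t) (ht : t < P) :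
    pvSet3 (pvTab m n P F) i j t v = pvTab m n P (pvUpd F i j t v) := by
  unfold pvSet3 pvCell pvTab pvUpd
  rw [PySem.List.pyGetD_map_pyRange_of_nonneg _ _ _ _ hi0 hi,
      PySem.List.pyGetD_map_pyRange_of_nonneg _ _ _ _ hj0 hj,
      pvSetMapPyRange _ _ _ _ ht0 ht,
      pvSetMapPyRange _ _ _ _ hj0 hj,
      pvSetMapPyRange _ _ _ _ hi0 hi]
  refine List.map_congr_left (fun i' hi' => ?_)
  rw [PySem.List.mem_pyRange_one] at hi'
  by_cases hii : i' = i
  · subst hii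
    rw [if_pos rfl]
    refine List.map_congr_left (fun j' hj' => ?_)
    rw [PySem.List.mem_pyRange_one] at hj'
    by_cases hjj : j' = j
    · subst hjj
      rw [if_pos rfl]
      refine List.map_congr_left (fun t' ht' => ?_)
      rw [PySem.List.mem_pyRange_one] at ht'
      by_cases htt : t' = t
      · simp [htt]
      · simp [htt]
    · rw [if_neg hjj]
      refine List.map_congr_left (fun t' ht' => ?_)
      simp [hjj]
  · rw [if_neg hii]
    refine List.map_congr_left (fun j' hj' => ?_)
    refine List.map_congr_left (fun t' ht' => ?_)
    simp [hii]

-- ---------- A-side layer functions ----------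
def pvDirs : List (Int × Int) := [(0, 1), (1, 0), (0, -1), (-1, 0)]

def pvStepA (gold : List (List Int)) (m n : Int) (prev : Int → Int → Int) (i j : Int) : Int :=
  if pvGold gold i j = 0 then 0
  else
    pvDirs.foldl (fun acc d =>
      if 0 ≤ i + d.1 ∧ i + d.1 < m ∧ 0 ≤ j + d.2 ∧ j + d.2 < n ∧ prev (i + d.1) (j + d.2) > 0 then
        max acc (prev (i + d.1) (j + d.2) + pvGold gold i j)
      else acc) 0

def pvLayA (gold : List (List Int)) (m n : Int) : Nat → Int → Int → Int
  | 0 => fun i j => if pvGold gold i j > 0 then pvGold gold i j else 0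
  | k + 1 => pvStepA gold m n (pvLayA gold m n k)

theorem pvUpdSelf (F : Int → Int → Int → Int) (i j t v : Int) : pvUpd F i j t v i j t = v := by
  simp [pvUpd]

theorem pvUpdUpd (F : Int → Int → Int → Int) (i j t a b : Int) :
    pvUpd (pvUpd F i j t a) i j t b = pvUpd F i j t b := by
  funext i' j' t'
  unfold pvUpd
  split_ifs <;> rfl

theorem pvUpdEq (F : Int → Int → Int → Int) (i j t v : Int) (h : F i j t = v) :
    pvUpd F i j t v = F := by
  funext i' j' t'
  unfold pvUpd
  split_ifs with hc
  · obtain ⟨h1, h2, h3⟩ := hc; subst h1; subst h2; subst h3; exact h.symm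
  · rfl

theorem pvUpdOtherT (F : Int → Int → Int → Int) (i j t v a b c : Int) (h : c ≠ t) :
    pvUpd F i j t v a b c = F a b c := by
  unfold pvUpd
  rw [if_neg]
  rintro ⟨-, -, h3⟩
  exact h h3

-- the 4-direction inner loop of A, on an abstract table, is a scalar fold
theorem pvDirFold (gold : List (List Int)) (m n P : Int) (F : Int → Int → Int → Int)
    (i j t : Int) (ds : List (Int × Int)) (acc : Int)
    (hi0 : 0 ≤ i) (hi : i < m) (hj0 : 0 ≤ j) (hj : j < n) (ht1 : 1 ≤ t) (ht : t < P) :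
    ds.foldl (fun dp d =>
        if 0 ≤ i + d.1 ∧ i + d.1 < m ∧ 0 ≤ j + d.2 ∧ j + d.2 < n ∧
            pvGet3 dp (i + d.1) (j + d.2) (t - 1) > 0 then
          pvSet3 dp i j t (max (pvGet3 dp i j t) (pvGet3 dp (i + d.1) (j + d.2) (t - 1) + pvGold gold i j))
        else dp) (pvTab m n P (pvUpd F i j t acc))
      = pvTab m n P (pvUpd F i j t (ds.foldl (fun a d =>
          if 0 ≤ i + d.1 ∧ i + d.1 < m ∧ 0 ≤ j + d.2 ∧ j + d.2 < n ∧
              F (i + d.1) (j + d.2) (t - 1) > 0 then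
            max a (F (i + d.1) (j + d.2) (t - 1) + pvGold gold i j)
          else a) acc)) := by
  induction ds generalizing acc with
  | nil => simp
  | cons d ds ih =>
    simp only [List.foldl_cons]
    by_cases hb : 0 ≤ i + d.1 ∧ i + d.1 < m ∧ 0 ≤ j + d.2 ∧ j + d.2 < n
    · have hget : pvGet3 (pvTab m n P (pvUpd F i j t acc)) (i + d.1) (j + d.2) (t - 1)
          = F (i + d.1) (j + d.2) (t - 1) := by
        rw [pvGetTab _ _ _ _ _ _ _ hb.1 hb.2.1 hb.2.2.1 hb.2.2.2 (by omega) (by omega)]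
        exact pvUpdOtherT _ _ _ _ _ _ _ _ (by omega)
      by_cases hv : F (i + d.1) (j + d.2) (t - 1) > 0
      · rw [if_pos ⟨hb.1, hb.2.1, hb.2.2.1, hb.2.2.2, by rw [hget]; exact hv⟩,
           if_pos ⟨hb.1, hb.2.1, hb.2.2.1, hb.2.2.2, hv⟩, hget,
           pvGetTab _ _ _ _ _ _ _ hi0 hi hj0 hj (by omega) ht, pvUpdSelf,
           pvSetTab _ _ _ _ _ _ _ _ hi0 hi hj0 hj (by omega) ht, pvUpdUpd]
        exact ih _
      · rw [if_neg (by rw [hget]; rintro ⟨-, -, -, -, h5⟩; exact hv h5),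
           if_neg (by rintro ⟨-, -, -, -, h5⟩; exact hv h5)]
        exact ih _
    · rw [if_neg (by rintro ⟨h1, h2, h3, h4, -⟩; exact hb ⟨h1, h2, h3, h4⟩),
         if_neg (by rintro ⟨h1, h2, h3, h4, -⟩; exact hb ⟨h1, h2, h3, h4⟩)]
      exact ih _

-- one cell of A's time loop
theorem pvCellStep (gold : List (List Int)) (m n P : Int) (F : Int → Int → Int → Int)
    (i j t : Int) (hi0 : 0 ≤ i) (hi : i < m) (hj0 : 0 ≤ j) (hj : j < n)
    (ht1 : 1 ≤ t) (ht : t < P) (h0 : F i j t = 0) :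
    (if pvGold gold i j = 0 then pvTab m n P F
     else pvDirs.foldl (fun dp d =>
        if 0 ≤ i + d.1 ∧ i + d.1 < m ∧ 0 ≤ j + d.2 ∧ j + d.2 < n ∧
            pvGet3 dp (i + d.1) (j + d.2) (t - 1) > 0 then
          pvSet3 dp i j t (max (pvGet3 dp i j t) (pvGet3 dp (i + d.1) (j + d.2) (t - 1) + pvGold gold i j))
        else dp) (pvTab m n P F))
      = pvTab m n P (pvUpd F i j t (pvStepA gold m n (fun a b => F a b (t - 1)) i j)) := by
  by_cases hg : pvGold gold i j = 0
  · rw [if_pos hg]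
    unfold pvStepA
    rw [if_pos hg, pvUpdEq _ _ _ _ _ h0]
  · rw [if_neg hg]
    have hbase : pvTab m n P F = pvTab m n P (pvUpd F i j t 0) := by
      rw [pvUpdEq _ _ _ _ _ h0]
    rw [hbase, pvDirFold gold m n P F i j t pvDirs 0 hi0 hi hj0 hj ht1 ht]
    unfold pvStepA
    rw [if_neg hg]

-- layers written into the table so far: dp[i][j][t] for 1 ≤ t ≤ c holds layer t-1
def pvFup (gold : List (List Int)) (m n c : Int) : Int → Int → Int → Int :=
  fun i j t => if 1 ≤ t ∧ t ≤ c then pvLayA gold m n (t - 1).toNat i j else 0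

-- the initialisation double loop fills layer 1
theorem pvInitSweep (gold : List (List Int)) (M N : Nat) (P : Int) (hP : 1 < P) :
    (PySem.List.pyRange 0 (M : Int) 1).foldl (fun dp i =>
      (PySem.List.pyRange 0 (N : Int) 1).foldl (fun dp j =>
        if pvGold gold i j > 0 then pvSet3 dp i j 1 (pvGold gold i j) else dp) dp)
      (pvTab (M : Int) (N : Int) P (fun _ _ _ => 0))
    = pvTab (M : Int) (N : Int) P (pvFup gold (M : Int) (N : Int) 1) := by
  rw [PySem.List.pyRange_zero_natCast M, List.foldl_map]
  have hrow : ∀ r : Nat, r < M →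
      (PySem.List.pyRange 0 (N : Int) 1).foldl (fun dp j =>
        if pvGold gold (r : Int) j > 0 then pvSet3 dp (r : Int) j 1 (pvGold gold (r : Int) j) else dp)
        (pvTab (M : Int) (N : Int) P (fun i' j' t' =>
          if t' = 1 ∧ i' < (r : Int) then pvLayA gold (M : Int) (N : Int) 0 i' j' else 0))
      = pvTab (M : Int) (N : Int) P (fun i' j' t' =>
          if t' = 1 ∧ i' < ((r : Int) + 1) then pvLayA gold (M : Int) (N : Int) 0 i' j' else 0) := by
    intro r hr
    rw [PySem.List.pyRange_zero_natCast N, List.foldl_map]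
    have hcol : ∀ c : Nat, c < N →
        (if pvGold gold (r : Int) (c : Int) > 0 then
          pvSet3 (pvTab (M : Int) (N : Int) P (fun i' j' t' =>
            if t' = 1 ∧ (i' < (r : Int) ∨ (i' = (r : Int) ∧ j' < (c : Int))) then
              pvLayA gold (M : Int) (N : Int) 0 i' j' else 0)) (r : Int) (c : Int) 1
            (pvGold gold (r : Int) (c : Int))
         else pvTab (M : Int) (N : Int) P (fun i' j' t' =>
            if t' = 1 ∧ (i' < (r : Int) ∨ (i' = (r : Int) ∧ j' < (c : Int))) then
              pvLayA gold (M : Int) (N : Int) 0 i' j' else 0))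
        = pvTab (M : Int) (N : Int) P (fun i' j' t' =>
            if t' = 1 ∧ (i' < (r : Int) ∨ (i' = (r : Int) ∧ j' < (c : Int) + 1)) then
              pvLayA gold (M : Int) (N : Int) 0 i' j' else 0) := by
      intro c hc
      have hMr : (r : Int) < (M : Int) := by exact_mod_cast hr
      have hNc : (c : Int) < (N : Int) := by exact_mod_cast hc
      have hval : (if pvGold gold (r : Int) (c : Int) > 0 then
            pvSet3 (pvTab (M : Int) (N : Int) P (fun i' j' t' =>
              if t' = 1 ∧ (i' < (r : Int) ∨ (i' = (r : Int) ∧ j' < (c : Int))) then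
                pvLayA gold (M : Int) (N : Int) 0 i' j' else 0)) (r : Int) (c : Int) 1
              (pvGold gold (r : Int) (c : Int))
          else pvTab (M : Int) (N : Int) P (fun i' j' t' =>
              if t' = 1 ∧ (i' < (r : Int) ∨ (i' = (r : Int) ∧ j' < (c : Int))) then
                pvLayA gold (M : Int) (N : Int) 0 i' j' else 0))
          = pvTab (M : Int) (N : Int) P (pvUpd (fun i' j' t' =>
              if t' = 1 ∧ (i' < (r : Int) ∨ (i' = (r : Int) ∧ j' < (c : Int))) then
                pvLayA gold (M : Int) (N : Int) 0 i' j' else 0) (r : Int) (c : Int) 1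
              (pvLayA gold (M : Int) (N : Int) 0 (r : Int) (c : Int))) := by
        by_cases hg : pvGold gold (r : Int) (c : Int) > 0
        · rw [if_pos hg, pvSetTab _ _ _ _ _ _ _ _ (by positivity) hMr (by positivity) hNc
            (by omega) hP]
          congr 1
          simp [pvLayA, hg]
        · rw [if_neg hg, pvUpdEq]
          rw [if_neg (by rintro ⟨-, h | ⟨-, h⟩⟩ <;> omega)]
          simp [pvLayA, hg]
      rw [hval]
      refine pvTabCongr _ _ _ _ _ ?_
      intro i' j' t' hi0 hi hj0 hj ht0 ht
      by_cases hC : i' = (r : Int) ∧ j' = (c : Int) ∧ t' = 1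
      · obtain ⟨e1, e2, e3⟩ := hC
        subst e1; subst e2; subst e3
        rw [pvUpdSelf, if_pos ⟨rfl, Or.inr ⟨rfl, by omega⟩⟩]
      · unfold pvUpd
        rw [if_neg hC]
        beta_reduce
        split_ifs <;> first | rfl | omega
    have hbase : pvTab (M : Int) (N : Int) P (fun i' j' t' =>
          if t' = 1 ∧ i' < (r : Int) then pvLayA gold (M : Int) (N : Int) 0 i' j' else 0)
        = pvTab (M : Int) (N : Int) P (fun i' j' t' =>
          if t' = 1 ∧ (i' < (r : Int) ∨ (i' = (r : Int) ∧ j' < ((0 : Nat) : Int))) then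
            pvLayA gold (M : Int) (N : Int) 0 i' j' else 0) := by
      refine pvTabCongr _ _ _ _ _ ?_
      intro i' j' t' hi0 hi hj0 hj ht0 ht
      split_ifs <;> first | rfl | omega
    rw [hbase]
    have hfold := pvFoldlRangeUpd N
      (fun dp (c : Nat) =>
        if pvGold gold (r : Int) (c : Int) > 0 then
          pvSet3 dp (r : Int) (c : Int) 1 (pvGold gold (r : Int) (c : Int)) else dp)
      (fun c => pvTab (M : Int) (N : Int) P (fun i' j' t' =>
        if t' = 1 ∧ (i' < (r : Int) ∨ (i' = (r : Int) ∧ j' < (c : Int))) then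
          pvLayA gold (M : Int) (N : Int) 0 i' j' else 0))
      (fun c hc => by
        refine Eq.trans (hcol c hc) ?_
        refine pvTabCongr _ _ _ _ _ ?_
        intro i' j' t' hi0 hi hj0 hj ht0 ht
        split_ifs <;> first | rfl | omega)
    refine Eq.trans hfold ?_
    refine pvTabCongr _ _ _ _ _ ?_
    intro i' j' t' hi0 hi hj0 hj ht0 ht
    split_ifs <;> first | rfl | omega
  have hbase : pvTab (M : Int) (N : Int) P (fun _ _ _ => (0 : Int))
      = pvTab (M : Int) (N : Int) P (fun i' j' t' =>
          if t' = 1 ∧ i' < ((0 : Nat) : Int) then pvLayA gold (M : Int) (N : Int) 0 i' j' else 0) := by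
    refine pvTabCongr _ _ _ _ _ ?_
    intro i' j' t' hi0 hi hj0 hj ht0 ht
    split_ifs <;> first | rfl | omega
  rw [hbase]
  have hfold := pvFoldlRangeUpd M
    (fun dp (r : Nat) =>
      (PySem.List.pyRange 0 (N : Int) 1).foldl (fun dp j =>
        if pvGold gold (r : Int) j > 0 then pvSet3 dp (r : Int) j 1 (pvGold gold (r : Int) j) else dp) dp)
    (fun r => pvTab (M : Int) (N : Int) P (fun i' j' t' =>
      if t' = 1 ∧ i' < (r : Int) then pvLayA gold (M : Int) (N : Int) 0 i' j' else 0))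
    (fun r hr => by
      refine Eq.trans (hrow r hr) ?_
      refine pvTabCongr _ _ _ _ _ ?_
      intro i' j' t' hi0 hi hj0 hj ht0 ht
      split_ifs <;> first | rfl | omega)
  refine Eq.trans hfold ?_
  refine pvTabCongr _ _ _ _ _ ?_
  intro i' j' t' hi0 hi hj0 hj ht0 ht
  unfold pvFup
  by_cases hT1 : t' = 1
  · subst hT1
    rw [if_pos ⟨rfl, hi⟩, if_pos (by omega)]
    norm_num
  · rw [if_neg (by omega), if_neg (by omega)]

-- one iteration of A's time loop computes the next layer
theorem pvTimeStep (gold : List (List Int)) (M N : Nat) (P t : Int)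
    (h2 : 2 ≤ t) (ht : t < P) :
    (PySem.List.pyRange 0 (M : Int) 1).foldl (fun dp i =>
      (PySem.List.pyRange 0 (N : Int) 1).foldl (fun dp j =>
        if pvGold gold i j = 0 then dp
        else pvDirs.foldl (fun dp d =>
          if 0 ≤ i + d.1 ∧ i + d.1 < (M : Int) ∧ 0 ≤ j + d.2 ∧ j + d.2 < (N : Int) ∧
              pvGet3 dp (i + d.1) (j + d.2) (t - 1) > 0 then
            pvSet3 dp i j t (max (pvGet3 dp i j t) (pvGet3 dp (i + d.1) (j + d.2) (t - 1) + pvGold gold i j))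
          else dp) dp) dp)
      (pvTab (M : Int) (N : Int) P (pvFup gold (M : Int) (N : Int) (t - 1)))
    = pvTab (M : Int) (N : Int) P (pvFup gold (M : Int) (N : Int) t) := by
  rw [PySem.List.pyRange_zero_natCast M, List.foldl_map]
  have hrow : ∀ r : Nat, r < M →
      (PySem.List.pyRange 0 (N : Int) 1).foldl (fun dp j =>
        if pvGold gold (r : Int) j = 0 then dp
        else pvDirs.foldl (fun dp d =>
          if 0 ≤ (r : Int) + d.1 ∧ (r : Int) + d.1 < (M : Int) ∧ 0 ≤ j + d.2 ∧ j + d.2 < (N : Int) ∧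
              pvGet3 dp ((r : Int) + d.1) (j + d.2) (t - 1) > 0 then
            pvSet3 dp (r : Int) j t
              (max (pvGet3 dp (r : Int) j t) (pvGet3 dp ((r : Int) + d.1) (j + d.2) (t - 1) + pvGold gold (r : Int) j))
          else dp) dp)
        (pvTab (M : Int) (N : Int) P (fun i' j' t' =>
          if t' = t ∧ i' < (r : Int) then pvLayA gold (M : Int) (N : Int) (t - 1).toNat i' j'
          else pvFup gold (M : Int) (N : Int) (t - 1) i' j' t'))
      = pvTab (M : Int) (N : Int) P (fun i' j' t' =>
          if t' = t ∧ i' < (r : Int) + 1 then pvLayA gold (M : Int) (N : Int) (t - 1).toNat i' j'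
          else pvFup gold (M : Int) (N : Int) (t - 1) i' j' t') := by
    intro r hr
    rw [PySem.List.pyRange_zero_natCast N, List.foldl_map]
    have hMr : (r : Int) < (M : Int) := by exact_mod_cast hr
    have hcol : ∀ c : Nat, c < N →
        (if pvGold gold (r : Int) (c : Int) = 0 then
          (pvTab (M : Int) (N : Int) P (fun i' j' t' =>
            if t' = t ∧ (i' < (r : Int) ∨ (i' = (r : Int) ∧ j' < (c : Int))) then
              pvLayA gold (M : Int) (N : Int) (t - 1).toNat i' j'
            else pvFup gold (M : Int) (N : Int) (t - 1) i' j' t'))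
         else pvDirs.foldl (fun dp d =>
            if 0 ≤ (r : Int) + d.1 ∧ (r : Int) + d.1 < (M : Int) ∧ 0 ≤ (c : Int) + d.2 ∧ (c : Int) + d.2 < (N : Int) ∧
                pvGet3 dp ((r : Int) + d.1) ((c : Int) + d.2) (t - 1) > 0 then
              pvSet3 dp (r : Int) (c : Int) t
                (max (pvGet3 dp (r : Int) (c : Int) t) (pvGet3 dp ((r : Int) + d.1) ((c : Int) + d.2) (t - 1) + pvGold gold (r : Int) (c : Int)))
            else dp)
          (pvTab (M : Int) (N : Int) P (fun i' j' t' =>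
            if t' = t ∧ (i' < (r : Int) ∨ (i' = (r : Int) ∧ j' < (c : Int))) then
              pvLayA gold (M : Int) (N : Int) (t - 1).toNat i' j'
            else pvFup gold (M : Int) (N : Int) (t - 1) i' j' t')))
        = pvTab (M : Int) (N : Int) P (fun i' j' t' =>
            if t' = t ∧ (i' < (r : Int) ∨ (i' = (r : Int) ∧ j' < (c : Int) + 1)) then
              pvLayA gold (M : Int) (N : Int) (t - 1).toNat i' j'
            else pvFup gold (M : Int) (N : Int) (t - 1) i' j' t') := by
      intro c hc
      have hNc : (c : Int) < (N : Int) := by exact_mod_cast hc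
      have hcell := pvCellStep gold (M : Int) (N : Int) P
        (fun i' j' t' =>
            if t' = t ∧ (i' < (r : Int) ∨ (i' = (r : Int) ∧ j' < (c : Int))) then
              pvLayA gold (M : Int) (N : Int) (t - 1).toNat i' j'
            else pvFup gold (M : Int) (N : Int) (t - 1) i' j' t')
        (r : Int) (c : Int) t (by positivity) hMr (by positivity) hNc (by omega) ht
        (by
          beta_reduce
          rw [if_neg (by rintro ⟨-, h | ⟨-, h⟩⟩ <;> omega)]
          unfold pvFup
          rw [if_neg (by omega)])
      refine Eq.trans hcell ?_
      have hprev : (fun a b =>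
          (fun i' j' t' =>
            if t' = t ∧ (i' < (r : Int) ∨ (i' = (r : Int) ∧ j' < (c : Int))) then
              pvLayA gold (M : Int) (N : Int) (t - 1).toNat i' j'
            else pvFup gold (M : Int) (N : Int) (t - 1) i' j' t') a b (t - 1))
          = pvLayA gold (M : Int) (N : Int) (t - 2).toNat := by
        funext a b
        beta_reduce
        rw [if_neg (by rintro ⟨h, -⟩; omega)]
        unfold pvFup
        rw [if_pos (by omega)]
        congr 1
        omega
      rw [hprev]
      have hstep : pvStepA gold (M : Int) (N : Int) (pvLayA gold (M : Int) (N : Int) (t - 2).toNat) (r : Int) (c : Int)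
          = pvLayA gold (M : Int) (N : Int) (t - 1).toNat (r : Int) (c : Int) := by
        have hk : (t - 1).toNat = (t - 2).toNat + 1 := by omega
        rw [hk]
        rfl
      rw [hstep]
      refine pvTabCongr _ _ _ _ _ ?_
      intro i' j' t' hi0 hi hj0 hj ht0 ht'
      by_cases hC : i' = (r : Int) ∧ j' = (c : Int) ∧ t' = t
      · obtain ⟨e1, e2, e3⟩ := hC
        subst e1; subst e2; subst e3
        rw [pvUpdSelf, if_pos ⟨rfl, Or.inr ⟨rfl, by omega⟩⟩]
      · unfold pvUpd
        rw [if_neg hC]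
        beta_reduce
        split_ifs <;> first | rfl | omega
    have hbase : pvTab (M : Int) (N : Int) P (fun i' j' t' =>
          if t' = t ∧ i' < (r : Int) then pvLayA gold (M : Int) (N : Int) (t - 1).toNat i' j'
          else pvFup gold (M : Int) (N : Int) (t - 1) i' j' t')
        = pvTab (M : Int) (N : Int) P (fun i' j' t' =>
          if t' = t ∧ (i' < (r : Int) ∨ (i' = (r : Int) ∧ j' < ((0 : Nat) : Int))) then
            pvLayA gold (M : Int) (N : Int) (t - 1).toNat i' j'
          else pvFup gold (M : Int) (N : Int) (t - 1) i' j' t') := by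
      refine pvTabCongr _ _ _ _ _ ?_
      intro i' j' t' hi0 hi hj0 hj ht0 ht'
      split_ifs <;> first | rfl | omega
    rw [hbase]
    have hfold := pvFoldlRangeUpd N
      (fun dp (c : Nat) =>
        if pvGold gold (r : Int) (c : Int) = 0 then dp
        else pvDirs.foldl (fun dp d =>
          if 0 ≤ (r : Int) + d.1 ∧ (r : Int) + d.1 < (M : Int) ∧ 0 ≤ (c : Int) + d.2 ∧ (c : Int) + d.2 < (N : Int) ∧
              pvGet3 dp ((r : Int) + d.1) ((c : Int) + d.2) (t - 1) > 0 then
            pvSet3 dp (r : Int) (c : Int) t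
              (max (pvGet3 dp (r : Int) (c : Int) t) (pvGet3 dp ((r : Int) + d.1) ((c : Int) + d.2) (t - 1) + pvGold gold (r : Int) (c : Int)))
          else dp) dp)
      (fun c => pvTab (M : Int) (N : Int) P (fun i' j' t' =>
        if t' = t ∧ (i' < (r : Int) ∨ (i' = (r : Int) ∧ j' < (c : Int))) then
          pvLayA gold (M : Int) (N : Int) (t - 1).toNat i' j'
        else pvFup gold (M : Int) (N : Int) (t - 1) i' j' t'))
      (fun c hc => by
        refine Eq.trans (hcol c hc) ?_
        refine pvTabCongr _ _ _ _ _ ?_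
        intro i' j' t' hi0 hi hj0 hj ht0 ht'
        split_ifs <;> first | rfl | omega)
    refine Eq.trans hfold ?_
    refine pvTabCongr _ _ _ _ _ ?_
    intro i' j' t' hi0 hi hj0 hj ht0 ht'
    split_ifs <;> first | rfl | omega
  have hbase : pvTab (M : Int) (N : Int) P (pvFup gold (M : Int) (N : Int) (t - 1))
      = pvTab (M : Int) (N : Int) P (fun i' j' t' =>
          if t' = t ∧ i' < ((0 : Nat) : Int) then pvLayA gold (M : Int) (N : Int) (t - 1).toNat i' j'
          else pvFup gold (M : Int) (N : Int) (t - 1) i' j' t') := by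
    refine pvTabCongr _ _ _ _ _ ?_
    intro i' j' t' hi0 hi hj0 hj ht0 ht'
    split_ifs <;> first | rfl | omega
  rw [hbase]
  have hfold := pvFoldlRangeUpd M
    (fun dp (r : Nat) =>
      (PySem.List.pyRange 0 (N : Int) 1).foldl (fun dp j =>
        if pvGold gold (r : Int) j = 0 then dp
        else pvDirs.foldl (fun dp d =>
          if 0 ≤ (r : Int) + d.1 ∧ (r : Int) + d.1 < (M : Int) ∧ 0 ≤ j + d.2 ∧ j + d.2 < (N : Int) ∧
              pvGet3 dp ((r : Int) + d.1) (j + d.2) (t - 1) > 0 then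
            pvSet3 dp (r : Int) j t
              (max (pvGet3 dp (r : Int) j t) (pvGet3 dp ((r : Int) + d.1) (j + d.2) (t - 1) + pvGold gold (r : Int) j))
          else dp) dp) dp)
    (fun r => pvTab (M : Int) (N : Int) P (fun i' j' t' =>
      if t' = t ∧ i' < (r : Int) then pvLayA gold (M : Int) (N : Int) (t - 1).toNat i' j'
      else pvFup gold (M : Int) (N : Int) (t - 1) i' j' t'))
    (fun r hr => by
      refine Eq.trans (hrow r hr) ?_
      refine pvTabCongr _ _ _ _ _ ?_
      intro i' j' t' hi0 hi hj0 hj ht0 ht'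
      split_ifs <;> first | rfl | omega)
  refine Eq.trans hfold ?_
  refine pvTabCongr _ _ _ _ _ ?_
  intro i' j' t' hi0 hi hj0 hj ht0 ht'
  unfold pvFup
  by_cases hTt : t' = t
  · subst hTt
    rw [if_pos ⟨rfl, hi⟩, if_pos (by omega)]
  · rw [if_neg (by omega)]
    split_ifs <;> first | rfl | omega

-- folding the whole time loop
set_option maxHeartbeats 1000000 in
theorem pvTimeFold (gold : List (List Int)) (M N : Nat) (T : Int) (hT : 1 ≤ T) :
    (PySem.List.pyRange 2 (T + 1) 1).foldl (fun dp t =>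
      (PySem.List.pyRange 0 (M : Int) 1).foldl (fun dp i =>
        (PySem.List.pyRange 0 (N : Int) 1).foldl (fun dp j =>
          if pvGold gold i j = 0 then dp
          else pvDirs.foldl (fun dp d =>
            if 0 ≤ i + d.1 ∧ i + d.1 < (M : Int) ∧ 0 ≤ j + d.2 ∧ j + d.2 < (N : Int) ∧
                pvGet3 dp (i + d.1) (j + d.2) (t - 1) > 0 then
              pvSet3 dp i j t (max (pvGet3 dp i j t) (pvGet3 dp (i + d.1) (j + d.2) (t - 1) + pvGold gold i j))
            else dp) dp) dp) dp)
      (pvTab (M : Int) (N : Int) (T + 1) (pvFup gold (M : Int) (N : Int) 1))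
    = pvTab (M : Int) (N : Int) (T + 1) (pvFup gold (M : Int) (N : Int) T) := by
  rw [PySem.List.pyRange_one 2 (T + 1), List.foldl_map]
  have hfold := pvFoldlRangeUpd (T + 1 - 2).toNat
    (fun dp (k : Nat) =>
      (PySem.List.pyRange 0 (M : Int) 1).foldl (fun dp i =>
        (PySem.List.pyRange 0 (N : Int) 1).foldl (fun dp j =>
          if pvGold gold i j = 0 then dp
          else pvDirs.foldl (fun dp d =>
            if 0 ≤ i + d.1 ∧ i + d.1 < (M : Int) ∧ 0 ≤ j + d.2 ∧ j + d.2 < (N : Int) ∧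
                pvGet3 dp (i + d.1) (j + d.2) ((2 + (k : Int)) - 1) > 0 then
              pvSet3 dp i j (2 + (k : Int))
                (max (pvGet3 dp i j (2 + (k : Int))) (pvGet3 dp (i + d.1) (j + d.2) ((2 + (k : Int)) - 1) + pvGold gold i j))
            else dp) dp) dp) dp)
    (fun k => pvTab (M : Int) (N : Int) (T + 1) (pvFup gold (M : Int) (N : Int) (1 + (k : Int))))
    (fun k hk => by
      beta_reduce
      have hstep := pvTimeStep gold M N (T + 1) (2 + (k : Int)) (by omega) (by omega)
      have e1 : (2 + (k : Int)) - 1 = 1 + (k : Int) := by ring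
      rw [e1] at hstep
      rw [e1]
      refine hstep.trans ?_
      exact congrArg (fun c => pvTab (M : Int) (N : Int) (T + 1) (pvFup gold (M : Int) (N : Int) c))
        (by push_cast; ring))
  have h0 : pvTab (M : Int) (N : Int) (T + 1) (pvFup gold (M : Int) (N : Int) (1 + ((0 : Nat) : Int)))
      = pvTab (M : Int) (N : Int) (T + 1) (pvFup gold (M : Int) (N : Int) 1) := by norm_num
  rw [← h0]
  refine Eq.trans hfold ?_
  exact congrArg (fun c => pvTab (M : Int) (N : Int) (T + 1) (pvFup gold (M : Int) (N : Int) c))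
    (by omega)

-- A's return value, characterised over the layer functions
theorem pvAChar (gold : List (List Int)) (T : Int)
    (h1 : gold ≠ []) (h2 : gold.headD [] ≠ []) (hT : 1 ≤ T) :
    gold_mine_with_time_limit gold T
      = (PySem.List.pyRange 0 (gold.length : Int) 1).foldl (fun mg i =>
          (PySem.List.pyRange 0 ((gold.headD []).length : Int) 1).foldl (fun mg j =>
            (PySem.List.pyRange 0 (T + 1) 1).foldl (fun mg t =>
              max mg (pvFup gold (gold.length : Int) ((gold.headD []).length : Int) T i j t)) mg) mg) 0 := by
  unfold gold_mine_with_time_limit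
  rw [if_neg (by push_neg; exact ⟨h1, h2, by omega⟩)]
  simp only []
  have hdp0 : ((PySem.List.pyRange 0 (gold.length : Int) 1).map (fun _ =>
      (PySem.List.pyRange 0 ((gold.headD []).length : Int) 1).map (fun _ =>
        (PySem.List.pyRange 0 (T + 1) 1).map (fun _ => (0 : Int)))))
      = pvTab (gold.length : Int) ((gold.headD []).length : Int) (T + 1) (fun _ _ _ => 0) := rfl
  rw [hdp0, pvInitSweep gold gold.length (gold.headD []).length (T + 1) (by omega),
    ← show pvDirs = [((0 : Int), (1 : Int)), (1, 0), (0, -1), (-1, 0)] from rfl,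
    pvTimeFold gold gold.length (gold.headD []).length T hT]
  refine PySem.List.foldl_congr_mem _ _ _ _ ?_
  intro acc i hi
  rw [PySem.List.mem_pyRange_one] at hi
  refine PySem.List.foldl_congr_mem _ _ _ _ ?_
  intro acc' j hj
  rw [PySem.List.mem_pyRange_one] at hj
  refine PySem.List.foldl_congr_mem _ _ _ _ ?_
  intro acc'' t ht
  rw [PySem.List.mem_pyRange_one] at ht
  rw [pvGetTab _ _ _ _ _ _ _ hi.1 hi.2 hj.1 hj.2 ht.1 ht.2]

-- ---------- B-side: memo invariant and correctness of the memoized recursion ----------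

-- every cached entry (i, j, t) ↦ v is an in-bounds cell with v the layer value at time t
def bInv (gold : List (List Int)) (m n : Int) (memo : PySem.Dict (Int × Int × Int) Int) : Prop :=
  ∀ i j t v, memo.get? (i, j, t) = some v →
    0 ≤ i ∧ i < m ∧ 0 ≤ j ∧ j < n ∧ 1 ≤ t ∧ v = pvLayA gold m n (t - 1).toNat i j

theorem bInvEmpty (gold : List (List Int)) (m n : Int) :
    bInv gold m n (PySem.Dict.empty : PySem.Dict (Int × Int × Int) Int) := by
  intro i j t v h
  rw [PySem.Dict.get?_empty] at h
  cases h

theorem bInvInsert (gold : List (List Int)) (m n : Int)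
    (memo : PySem.Dict (Int × Int × Int) Int) (i j t v : Int)
    (h : bInv gold m n memo)
    (hi0 : 0 ≤ i) (hi : i < m) (hj0 : 0 ≤ j) (hj : j < n) (ht : 1 ≤ t)
    (hv : v = pvLayA gold m n (t - 1).toNat i j) :
    bInv gold m n (memo.insert (i, j, t) v) := by
  intro i' j' t' v' h'
  rw [PySem.Dict.get?_insert] at h'
  by_cases hk : ((i', j', t') : Int × Int × Int) = (i, j, t)
  · rw [if_pos hk] at h'
    obtain ⟨e1, e2, e3⟩ : i' = i ∧ j' = j ∧ t' = t := by
      simpa [Prod.ext_iff] using hk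
    subst e1; subst e2; subst e3
    cases h'
    exact ⟨hi0, hi, hj0, hj, ht, hv⟩
  · rw [if_neg hk] at h'
    exact h i' j' t' v' h'

-- a state-threading foldl whose second component keeps an invariant computes a scalar foldl
theorem pvStateFold {ι σ : Type} (l : List ι) (P : σ → Prop) (fb : Int → ι → Int)
    (body : Int × σ → ι → Int × σ)
    (h : ∀ b s x, x ∈ l → P s → (body (b, s) x).1 = fb b x ∧ P (body (b, s) x).2) :
    ∀ b s, P s → (l.foldl body (b, s)).1 = l.foldl fb b ∧ P (l.foldl body (b, s)).2 := by
  induction l with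
  | nil => intro b s hs; exact ⟨rfl, hs⟩
  | cons x xs ih =>
    intro b s hs
    simp only [List.foldl_cons]
    obtain ⟨h1, h2⟩ := h b s x (by simp) hs
    have hpair : body (b, s) x = ((body (b, s) x).1, (body (b, s) x).2) := rfl
    rw [hpair, h1]
    exact ih (fun b s x hx hs => h b s x (by simp [hx]) hs) _ _ h2

-- a guarded max step; and reordering four such steps (used to align B's neighbour
-- probe order/update rule with A's 4-direction scalar fold)
def pvMStep (C : Prop) [Decidable C] (w acc : Int) : Int := if C then max acc w else acc

theorem pvMStep4 (C1 C2 C3 C4 : Prop) [Decidable C1] [Decidable C2] [Decidable C3] [Decidable C4]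
    (w1 w2 w3 w4 a : Int) :
    pvMStep C4 w4 (pvMStep C3 w3 (pvMStep C2 w2 (pvMStep C1 w1 a)))
      = pvMStep C1 w1 (pvMStep C3 w3 (pvMStep C2 w2 (pvMStep C4 w4 a))) := by
  unfold pvMStep
  split_ifs <;> omega

-- B's neighbour probe order/update rule computes A's 4-direction scalar fold
theorem bDirSwap (m n i j g : Int) (prev : Int → Int → Int) :
    ([(i - 1, j), (i + 1, j), (i, j - 1), (i, j + 1)] : List (Int × Int)).foldl
      (fun acc p =>
        if 0 ≤ p.1 ∧ p.1 < m ∧ 0 ≤ p.2 ∧ p.2 < n then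
          (if prev p.1 p.2 > 0 ∧ prev p.1 p.2 + g > acc then prev p.1 p.2 + g else acc)
        else acc) 0
    = pvDirs.foldl (fun acc d =>
        if 0 ≤ i + d.1 ∧ i + d.1 < m ∧ 0 ≤ j + d.2 ∧ j + d.2 < n ∧ prev (i + d.1) (j + d.2) > 0 then
          max acc (prev (i + d.1) (j + d.2) + g)
        else acc) 0 := by
  have e1 : i - 1 = i + (-1 : Int) := by ring
  have e2 : j - 1 = j + (-1 : Int) := by ring
  have hL : ∀ (acc : Int) (p : Int × Int),
      (if 0 ≤ p.1 ∧ p.1 < m ∧ 0 ≤ p.2 ∧ p.2 < n then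
        (if prev p.1 p.2 > 0 ∧ prev p.1 p.2 + g > acc then prev p.1 p.2 + g else acc)
      else acc)
      = pvMStep (0 ≤ p.1 ∧ p.1 < m ∧ 0 ≤ p.2 ∧ p.2 < n ∧ prev p.1 p.2 > 0)
          (prev p.1 p.2 + g) acc := by
    intro acc p
    unfold pvMStep
    split_ifs <;> omega
  have hR : ∀ (acc : Int) (d : Int × Int),
      (if 0 ≤ i + d.1 ∧ i + d.1 < m ∧ 0 ≤ j + d.2 ∧ j + d.2 < n ∧ prev (i + d.1) (j + d.2) > 0 then
        max acc (prev (i + d.1) (j + d.2) + g)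
      else acc)
      = pvMStep (0 ≤ i + d.1 ∧ i + d.1 < m ∧ 0 ≤ j + d.2 ∧ j + d.2 < n ∧ prev (i + d.1) (j + d.2) > 0)
          (prev (i + d.1) (j + d.2) + g) acc := by
    intro acc d
    rfl
  simp only [List.foldl_cons, List.foldl_nil, hL, hR, pvDirs, e1, e2, add_zero]
  exact pvMStep4 _ _ _ _ _ _ _ _ 0

-- the memoized recursion computes the layer function and preserves the invariant
theorem bFCorrect (gold : List (List Int)) (m n : Int) :
    ∀ (t : Nat) (i j : Int) (memo : PySem.Dict (Int × Int × Int) Int),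
      0 ≤ i → i < m → 0 ≤ j → j < n → bInv gold m n memo →
      (altF gold m n t i j memo).1 = pvLayA gold m n t i j ∧
      bInv gold m n (altF gold m n t i j memo).2 := by
  intro t
  induction t with
  | zero =>
    intro i j memo hi0 hi hj0 hj hinv
    rw [altF]
    cases hmem : memo.get? (i, j, ((0 : Nat) : Int) + 1) with
    | some v =>
      simp only []
      have := hinv i j (((0 : Nat) : Int) + 1) v hmem
      refine ⟨?_, hinv⟩
      have hval := this.2.2.2.2.2
      have e : ((((0 : Nat) : Int) + 1) - 1).toNat = 0 := by simp
      rw [e] at hval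
      exact hval
    | none =>
      simp only []
      constructor
      · show (if bGold gold i j > 0 then bGold gold i j else 0) = pvLayA gold m n 0 i j
        rfl
      · refine bInvInsert gold m n memo i j 1 _ hinv hi0 hi hj0 hj (by omega) ?_
        show (if bGold gold i j > 0 then bGold gold i j else 0)
            = pvLayA gold m n ((1 : Int) - 1).toNat i j
        rfl
  | succ k ih =>
    intro i j memo hi0 hi hj0 hj hinv
    rw [altF]
    cases hmem : memo.get? (i, j, ((k + 1 : Nat) : Int) + 1) with
    | some v =>
      simp only []
      have := hinv i j (((k + 1 : Nat) : Int) + 1) v hmem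
      refine ⟨?_, hinv⟩
      have hval := this.2.2.2.2.2
      have e : ((((k + 1 : Nat) : Int) + 1) - 1).toNat = k + 1 := by omega
      rw [e] at hval
      exact hval
    | none =>
      simp only []
      by_cases hg : bGold gold i j = 0
      · rw [if_pos hg]
        constructor
        · show (0 : Int) = pvLayA gold m n (k + 1) i j
          show (0 : Int) = pvStepA gold m n (pvLayA gold m n k) i j
          unfold pvStepA
          rw [if_pos (show pvGold gold i j = 0 from hg)]
        · refine bInvInsert gold m n memo i j ((k : Int) + 2) _ hinv hi0 hi hj0 hj (by omega) ?_
          show (0 : Int) = pvLayA gold m n (((k : Int) + 2) - 1).toNat i j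
          have e : (((k : Int) + 2) - 1).toNat = k + 1 := by omega
          rw [e]
          show (0 : Int) = pvStepA gold m n (pvLayA gold m n k) i j
          unfold pvStepA
          rw [if_pos (show pvGold gold i j = 0 from hg)]
      · rw [if_neg hg]
        have hfold := pvStateFold
          ([(i - 1, j), (i + 1, j), (i, j - 1), (i, j + 1)] : List (Int × Int))
          (bInv gold m n)
          (fun acc p =>
            if 0 ≤ p.1 ∧ p.1 < m ∧ 0 ≤ p.2 ∧ p.2 < n then
              (if pvLayA gold m n k p.1 p.2 > 0 ∧
                  pvLayA gold m n k p.1 p.2 + bGold gold i j > acc then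
                pvLayA gold m n k p.1 p.2 + bGold gold i j
              else acc)
            else acc)
          (fun st p =>
            if 0 ≤ p.1 ∧ p.1 < m ∧ 0 ≤ p.2 ∧ p.2 < n then
              ((if (altF gold m n k p.1 p.2 st.2).1 > 0 ∧
                  (altF gold m n k p.1 p.2 st.2).1 + bGold gold i j > st.1 then
                (altF gold m n k p.1 p.2 st.2).1 + bGold gold i j
              else st.1), (altF gold m n k p.1 p.2 st.2).2)
            else st)
          (by
            intro b s p hp hs
            by_cases hb : 0 ≤ p.1 ∧ p.1 < m ∧ 0 ≤ p.2 ∧ p.2 < n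
            · obtain ⟨hr1, hr2⟩ := ih p.1 p.2 s hb.1 hb.2.1 hb.2.2.1 hb.2.2.2 hs
              constructor
              · simp only [if_pos hb, hr1]
              · simp only [if_pos hb]
                exact hr2
            · constructor
              · simp only [if_neg hb]
              · simp only [if_neg hb]
                exact hs)
          0 memo hinv
        have hval : pvLayA gold m n (k + 1) i j
            = ([(i - 1, j), (i + 1, j), (i, j - 1), (i, j + 1)] : List (Int × Int)).foldl
              (fun acc p =>
                if 0 ≤ p.1 ∧ p.1 < m ∧ 0 ≤ p.2 ∧ p.2 < n then
                  (if pvLayA gold m n k p.1 p.2 > 0 ∧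
                      pvLayA gold m n k p.1 p.2 + bGold gold i j > acc then
                    pvLayA gold m n k p.1 p.2 + bGold gold i j
                  else acc)
                else acc) 0 := by
          rw [bDirSwap m n i j (bGold gold i j) (pvLayA gold m n k)]
          show pvStepA gold m n (pvLayA gold m n k) i j = _
          unfold pvStepA
          rw [if_neg (show ¬ pvGold gold i j = 0 from hg)]
          rfl
        constructor
        · simp only []
          rw [hfold.1, hval]
        · simp only []
          refine bInvInsert gold m n _ i j ((k : Int) + 2) _ hfold.2 hi0 hi hj0 hj (by omega) ?_
          have e : (((k : Int) + 2) - 1).toNat = k + 1 := by omega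
          rw [e, hfold.1, hval]

-- B's return value characterised as nested max folds over the layer functions
theorem pvBChar (gold : List (List Int)) (T : Int)
    (h1 : gold ≠ []) (h2 : gold.headD [] ≠ []) (hT : 1 ≤ T) :
    gold_mine_with_time_limit_alt gold T
      = (List.range T.toNat).foldl (fun b (t : Nat) =>
          (List.range gold.length).foldl (fun b (i : Nat) =>
            (List.range (gold.headD []).length).foldl (fun b (j : Nat) =>
              max b (pvLayA gold (gold.length : Int) ((gold.headD []).length : Int) t (i : Int) (j : Int))) b) b) 0 := by
  unfold gold_mine_with_time_limit_alt
  rw [if_neg (by push_neg; exact ⟨h1, h2, by omega⟩)]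
  simp only []
  have hstep3 : ∀ (t : Nat) (i : Nat), i < gold.length →
      ∀ (b : Int) (s : PySem.Dict (Int × Int × Int) Int),
        bInv gold (gold.length : Int) ((gold.headD []).length : Int) s →
        ((List.range (gold.headD []).length).foldl (fun st (j : Nat) =>
            ((if (altF gold (gold.length : Int) ((gold.headD []).length : Int) t (i : Int) (j : Int) st.2).1 > st.1 then
                (altF gold (gold.length : Int) ((gold.headD []).length : Int) t (i : Int) (j : Int) st.2).1
              else st.1),
              (altF gold (gold.length : Int) ((gold.headD []).length : Int) t (i : Int) (j : Int) st.2).2)) (b, s)).1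
          = (List.range (gold.headD []).length).foldl (fun b (j : Nat) =>
              max b (pvLayA gold (gold.length : Int) ((gold.headD []).length : Int) t (i : Int) (j : Int))) b
        ∧ bInv gold (gold.length : Int) ((gold.headD []).length : Int)
            ((List.range (gold.headD []).length).foldl (fun st (j : Nat) =>
            ((if (altF gold (gold.length : Int) ((gold.headD []).length : Int) t (i : Int) (j : Int) st.2).1 > st.1 then
                (altF gold (gold.length : Int) ((gold.headD []).length : Int) t (i : Int) (j : Int) st.2).1
              else st.1),
              (altF gold (gold.length : Int) ((gold.headD []).length : Int) t (i : Int) (j : Int) st.2).2)) (b, s)).2 := by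
    intro t i hi b s hs
    refine pvStateFold _ (bInv gold (gold.length : Int) ((gold.headD []).length : Int)) _ _ ?_ b s hs
    intro b' s' j hj hs'
    rw [List.mem_range] at hj
    obtain ⟨hr1, hr2⟩ := bFCorrect gold (gold.length : Int) ((gold.headD []).length : Int)
      t (i : Int) (j : Int) s'
      (Int.natCast_nonneg i) (by exact_mod_cast hi) (Int.natCast_nonneg j) (by exact_mod_cast hj) hs'
    constructor
    · show (if (altF gold (gold.length : Int) ((gold.headD []).length : Int) t (i : Int) (j : Int) s').1 > b' then
          (altF gold (gold.length : Int) ((gold.headD []).length : Int) t (i : Int) (j : Int) s').1 else b') = _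
      rw [hr1]
      exact pvIfMax b' _
    · exact hr2
  have hstep2 : ∀ (t : Nat) (b : Int) (s : PySem.Dict (Int × Int × Int) Int),
      bInv gold (gold.length : Int) ((gold.headD []).length : Int) s →
      ((List.range gold.length).foldl (fun st (i : Nat) =>
          (List.range (gold.headD []).length).foldl (fun st (j : Nat) =>
            ((if (altF gold (gold.length : Int) ((gold.headD []).length : Int) t (i : Int) (j : Int) st.2).1 > st.1 then
                (altF gold (gold.length : Int) ((gold.headD []).length : Int) t (i : Int) (j : Int) st.2).1
              else st.1),
              (altF gold (gold.length : Int) ((gold.headD []).length : Int) t (i : Int) (j : Int) st.2).2)) st) (b, s)).1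
        = (List.range gold.length).foldl (fun b (i : Nat) =>
            (List.range (gold.headD []).length).foldl (fun b (j : Nat) =>
              max b (pvLayA gold (gold.length : Int) ((gold.headD []).length : Int) t (i : Int) (j : Int))) b) b
      ∧ bInv gold (gold.length : Int) ((gold.headD []).length : Int)
          ((List.range gold.length).foldl (fun st (i : Nat) =>
          (List.range (gold.headD []).length).foldl (fun st (j : Nat) =>
            ((if (altF gold (gold.length : Int) ((gold.headD []).length : Int) t (i : Int) (j : Int) st.2).1 > st.1 then
                (altF gold (gold.length : Int) ((gold.headD []).length : Int) t (i : Int) (j : Int) st.2).1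
              else st.1),
              (altF gold (gold.length : Int) ((gold.headD []).length : Int) t (i : Int) (j : Int) st.2).2)) st) (b, s)).2 := by
    intro t b s hs
    refine pvStateFold _ (bInv gold (gold.length : Int) ((gold.headD []).length : Int)) _ _ ?_ b s hs
    intro b' s' i hi hs'
    rw [List.mem_range] at hi
    exact hstep3 t i hi b' s' hs'
  exact (pvStateFold (List.range T.toNat)
    (bInv gold (gold.length : Int) ((gold.headD []).length : Int)) _ _
    (fun b s t _ hs => hstep2 t b s hs) 0 PySem.Dict.empty
    (bInvEmpty gold (gold.length : Int) ((gold.headD []).length : Int))).1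

-- ---------- generic bounds for nested max folds ----------
theorem pvFoldGeneralMono {ι : Type} (l : List ι) (f : Int → ι → Int)
    (h : ∀ a x, x ∈ l → a ≤ f a x) (a : Int) : a ≤ l.foldl f a := by
  induction l generalizing a with
  | nil => simp
  | cons y ys ih =>
    simp only [List.foldl_cons]
    exact le_trans (h a y (by simp)) (ih (fun a x hx => h a x (by simp [hx])) _)

theorem pvFoldElem {ι : Type} (l : List ι) (f : Int → ι → Int)
    (hm : ∀ a x, x ∈ l → a ≤ f a x) (x : ι) (hx : x ∈ l) (v : Int)
    (hv : ∀ a, v ≤ f a x) (a : Int) : v ≤ l.foldl f a := by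
  induction l generalizing a with
  | nil => cases hx
  | cons y ys ih =>
    simp only [List.foldl_cons]
    rcases List.mem_cons.1 hx with h | h
    · subst h
      exact le_trans (hv a) (pvFoldGeneralMono ys f (fun a x hx => hm a x (by simp [hx])) _)
    · exact ih (fun a x hx => hm a x (by simp [hx])) h _

theorem pvFoldUpper {ι : Type} (l : List ι) (f : Int → ι → Int) (c : Int)
    (h : ∀ a x, x ∈ l → a ≤ c → f a x ≤ c) (a : Int) (ha : a ≤ c) : l.foldl f a ≤ c := by
  induction l generalizing a with
  | nil => simpa using ha
  | cons y ys ih =>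
    simp only [List.foldl_cons]
    exact ih (fun a x hx hac => h a x (by simp [hx]) hac) _ (h a y (by simp) ha)

-- A's triple max fold over pvFup equals B's t-major max fold over the layers
theorem pvMain (gold : List (List Int)) (T : Int) (hT : 1 ≤ T) :
    (PySem.List.pyRange 0 (gold.length : Int) 1).foldl (fun mg i =>
        (PySem.List.pyRange 0 ((gold.headD []).length : Int) 1).foldl (fun mg j =>
          (PySem.List.pyRange 0 (T + 1) 1).foldl (fun mg t =>
            max mg (pvFup gold (gold.length : Int) ((gold.headD []).length : Int) T i j t)) mg) mg) 0
      = (List.range T.toNat).foldl (fun b (t : Nat) =>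
          (List.range gold.length).foldl (fun b (i : Nat) =>
            (List.range (gold.headD []).length).foldl (fun b (j : Nat) =>
              max b (pvLayA gold (gold.length : Int) ((gold.headD []).length : Int) t (i : Int) (j : Int))) b) b) 0 := by
  set M := gold.length with hM
  set N := (gold.headD []).length with hN
  set m : Int := (M : Int)
  set n : Int := (N : Int)
  -- monotonicity at each nesting level, both sides
  have monoA2 : ∀ (i : Int) (a : Int) (j : Int), j ∈ PySem.List.pyRange 0 n 1 →
      a ≤ (PySem.List.pyRange 0 (T + 1) 1).foldl (fun mg t =>
        max mg (pvFup gold m n T i j t)) a :=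
    fun i a j _ => pvFoldGeneralMono _ _ (fun a x _ => le_max_left _ _) a
  have monoA1 : ∀ (a : Int) (i : Int), i ∈ PySem.List.pyRange 0 m 1 →
      a ≤ (PySem.List.pyRange 0 n 1).foldl (fun mg j =>
        (PySem.List.pyRange 0 (T + 1) 1).foldl (fun mg t =>
          max mg (pvFup gold m n T i j t)) mg) a :=
    fun a i _ => pvFoldGeneralMono _ _ (fun a j hj => monoA2 i a j hj) a
  have monoB2 : ∀ (t : Nat) (a : Int) (i : Nat), i ∈ List.range M →
      a ≤ (List.range N).foldl (fun b (j : Nat) => max b (pvLayA gold m n t (i : Int) (j : Int))) a :=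
    fun t a i _ => pvFoldGeneralMono _ _ (fun a x _ => le_max_left _ _) a
  have monoB1 : ∀ (a : Int) (t : Nat), t ∈ List.range T.toNat →
      a ≤ (List.range M).foldl (fun b (i : Nat) =>
        (List.range N).foldl (fun b (j : Nat) => max b (pvLayA gold m n t (i : Int) (j : Int))) b) a :=
    fun a t _ => pvFoldGeneralMono _ _ (fun a i hi => monoB2 t a i hi) a
  have hB0 : (0 : Int) ≤ (List.range T.toNat).foldl (fun b (t : Nat) =>
      (List.range M).foldl (fun b (i : Nat) =>
        (List.range N).foldl (fun b (j : Nat) =>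
          max b (pvLayA gold m n t (i : Int) (j : Int))) b) b) 0 :=
    pvFoldGeneralMono _ _ monoB1 0
  have hA0 : (0 : Int) ≤ (PySem.List.pyRange 0 m 1).foldl (fun mg i =>
      (PySem.List.pyRange 0 n 1).foldl (fun mg j =>
        (PySem.List.pyRange 0 (T + 1) 1).foldl (fun mg t =>
          max mg (pvFup gold m n T i j t)) mg) mg) 0 :=
    pvFoldGeneralMono _ _ monoA1 0
  -- each layer value occurs in each side
  have hTermB : ∀ (t : Nat) (i j : Nat), t < T.toNat → i < M → j < N →
      pvLayA gold m n t (i : Int) (j : Int)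
        ≤ (List.range T.toNat).foldl (fun b (t : Nat) =>
            (List.range M).foldl (fun b (i : Nat) =>
              (List.range N).foldl (fun b (j : Nat) =>
                max b (pvLayA gold m n t (i : Int) (j : Int))) b) b) 0 := by
    intro t i j ht hi hj
    refine pvFoldElem _ _ monoB1 t (List.mem_range.2 ht) _ (fun a => ?_) 0
    refine pvFoldElem _ _ (monoB2 t) i (List.mem_range.2 hi) _ (fun a' => ?_) a
    exact pvFoldElem (List.range N)
      (fun b (j : Nat) => max b (pvLayA gold m n t (i : Int) (j : Int)))
      (fun a x _ => le_max_left _ _) j (List.mem_range.2 hj)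
      (pvLayA gold m n t (i : Int) (j : Int)) (fun a'' => le_max_right _ _) a'
  have hTermA : ∀ (i j t : Int), 0 ≤ i → i < m → 0 ≤ j → j < n → 0 ≤ t → t < T + 1 →
      pvFup gold m n T i j t
        ≤ (PySem.List.pyRange 0 m 1).foldl (fun mg i =>
            (PySem.List.pyRange 0 n 1).foldl (fun mg j =>
              (PySem.List.pyRange 0 (T + 1) 1).foldl (fun mg t =>
                max mg (pvFup gold m n T i j t)) mg) mg) 0 := by
    intro i j t hi0 hi hj0 hj ht0 ht
    refine pvFoldElem _ _ monoA1 i (PySem.List.mem_pyRange_one.2 ⟨hi0, hi⟩) _ (fun a => ?_) 0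
    refine pvFoldElem _ _ (monoA2 i) j (PySem.List.mem_pyRange_one.2 ⟨hj0, hj⟩) _ (fun a' => ?_) a
    exact pvFoldElem (PySem.List.pyRange 0 (T + 1) 1)
      (fun mg t => max mg (pvFup gold m n T i j t))
      (fun a x _ => le_max_left _ _) t (PySem.List.mem_pyRange_one.2 ⟨ht0, ht⟩)
      (pvFup gold m n T i j t) (fun a'' => le_max_right _ _) a'
  refine le_antisymm ?_ ?_
  · -- A ≤ B
    refine pvFoldUpper _ _ _ ?_ 0 hB0
    intro a i hi ha
    rw [PySem.List.mem_pyRange_one] at hi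
    refine pvFoldUpper _ _ _ ?_ a ha
    intro a' j hj ha'
    rw [PySem.List.mem_pyRange_one] at hj
    refine pvFoldUpper _ _ _ ?_ a' ha'
    intro a'' t ht ha''
    rw [PySem.List.mem_pyRange_one] at ht
    refine max_le ha'' ?_
    unfold pvFup
    split_ifs with hc
    · have hlay := hTermB (t - 1).toNat i.toNat j.toNat (by omega) (by omega) (by omega)
      rw [Int.toNat_of_nonneg hi.1, Int.toNat_of_nonneg hj.1] at hlay
      exact hlay
    · exact hB0
  · -- B ≤ A
    refine pvFoldUpper _ _ _ ?_ 0 hA0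
    intro a t ht ha
    rw [List.mem_range] at ht
    refine pvFoldUpper _ _ _ ?_ a ha
    intro a' i hi ha'
    rw [List.mem_range] at hi
    refine pvFoldUpper _ _ _ ?_ a' ha'
    intro a'' j hj ha''
    rw [List.mem_range] at hj
    refine max_le ha'' ?_
    have heq : pvLayA gold m n t (i : Int) (j : Int)
        = pvFup gold m n T (i : Int) (j : Int) ((t : Int) + 1) := by
      unfold pvFup
      rw [if_pos (by omega)]
      congr 1
      omega
    rw [heq]
    exact hTermA (i : Int) (j : Int) ((t : Int) + 1) (Int.natCast_nonneg i)
      (by show ((i : Nat) : Int) < ((M : Nat) : Int); exact_mod_cast hi)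
      (Int.natCast_nonneg j)
      (by show ((j : Nat) : Int) < ((N : Nat) : Int); exact_mod_cast hj)
      (by omega) (by omega)

-- ===== VERDICT (by name: the statement is the Claim_ definition above) =====
theorem gold_mine_with_time_limit_spec : Claim_equal_gold_mine_with_time_limit := by
  intro gold T hdom hpre
  unfold Spec_gold_mine_with_time_limit
  by_cases hguard : gold = [] ∨ gold.headD [] = [] ∨ T ≤ 0
  · unfold gold_mine_with_time_limit gold_mine_with_time_limit_alt
    rw [if_pos hguard, if_pos hguard]
  · push_neg at hguard
    obtain ⟨h1, h2, h3⟩ := hguard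
    have hT : 1 ≤ T := by omega
    rw [pvAChar gold T h1 h2 hT, pvBChar gold T h1 h2 hT]
    exact pvMain gold T hT
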